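-- pv_equiv track=rewrite | github.com/Mori-kamiyama/procon_W-B | src/utils/metrics.py | heuristic_value
-- ===== SOURCE A (Python) =====
-- from collections import defaultdict
-- from typing import Dict, List, Tuple
--
-- Grid = List[List[int]]
--
-- def pair_positions(grid: Grid) -> Dict[int, List[Tuple[int, int]]]:
--     """Return mapping value -> list of coordinates where it appears.
--
--     Many puzzles here have exactly two occurrences for each value, but we do not
--     assume; we simply collect all.
--     """
--     pos: Dict[int, List[Tuple[int, int]]] = defaultdict(list)
--     for r, row in enumerate(grid):
--         for c, v in enumerate(row):
--             pos[v].append((r, c))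
--     return pos
--
-- def manhattan(a: Tuple[int, int], b: Tuple[int, int]) -> int:
--     return abs(a[0] - b[0]) + abs(a[1] - b[1])
--
-- def heuristic_value(grid: Grid) -> int:
--     """Heuristic used by old solvers: sum(max(0, dist - 1)) over all pairs.
--
--     If a value appears more than twice, we consider the best two occurrences.
--     If it appears once or zero times, contributes 0.
--     """
--     pos = pair_positions(grid)
--     total = 0
--     for v, coords in pos.items():
--         if len(coords) < 2:
--             continue
--         # use two farthest or first two? The C++ solver pairs the two locations in input.
--         # Here we use the first two for consistency with typical two-occurrence datasets.
--         a, b = coords[0], coords[1]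
--         dist = manhattan(a, b)
--         if dist > 1:
--             total += dist - 1
--     return int(total)
-- ===== SOURCE B (Python) =====
-- def heuristic_value(grid):
--     """Sort the flattened cells by value (stable sort: ties keep traversal
--     order), then scan the sorted list run by run, scoring the first two cells
--     of every run of equal values. No dictionary/index is built."""
--     cells = [(v, (r, c)) for r, row in enumerate(grid) for c, v in enumerate(row)]
--     cells.sort(key=lambda t: t[0])
--     total = 0
--     i, n = 0, len(cells)
--     while i < n:
--         v = cells[i][0]
--         j = i + 1
--         while j < n and cells[j][0] == v:
--             j += 1
--         if j - i >= 2: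
--             (r1, c1), (r2, c2) = cells[i][1], cells[i + 1][1]
--             total += max(0, abs(r1 - r2) + abs(c1 - c2) - 1)
--         i = j
--     return total
-- ===== Notes on version B (the rewrite author's own statement) =====
-- stated objective: alternative
-- what changed: Instead of A's hash index mapping each value to all its positions plus a second loop over the index, B stably sorts the flattened cell list by value and scans it run by run, scoring the first two cells of each run (stability keeps traversal order inside a run, so these are the first two occurrences).
import Mathlib
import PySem

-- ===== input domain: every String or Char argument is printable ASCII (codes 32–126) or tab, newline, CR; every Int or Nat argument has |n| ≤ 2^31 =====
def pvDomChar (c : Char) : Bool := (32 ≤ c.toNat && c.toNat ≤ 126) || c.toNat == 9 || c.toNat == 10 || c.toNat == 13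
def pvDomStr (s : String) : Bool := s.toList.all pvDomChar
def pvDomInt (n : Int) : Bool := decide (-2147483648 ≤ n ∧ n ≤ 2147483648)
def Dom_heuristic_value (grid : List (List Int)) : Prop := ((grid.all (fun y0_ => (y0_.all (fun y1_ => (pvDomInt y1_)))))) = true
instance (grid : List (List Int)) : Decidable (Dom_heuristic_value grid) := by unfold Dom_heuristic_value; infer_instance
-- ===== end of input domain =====

-- B replaces A's dict-of-all-positions + second loop over the index by a stable
-- sort of the flattened cells by value and a single run-by-run scan of the result.

-- ===== PORT A =====
def pv_manhattan (a b : Int × Int) : Int := |a.1 - b.1| + |a.2 - b.2|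

def pair_positions (grid : List (List Int)) : PySem.Dict Int (List (Int × Int)) :=
  (PySem.List.enumerate grid).foldl (fun pos rrow =>
    (PySem.List.enumerate rrow.2).foldl (fun pos cv =>
      pos.modify cv.2 [] (· ++ [(rrow.1, cv.1)])) pos) PySem.Dict.empty

def heuristic_value (grid : List (List Int)) : Int :=
  let pos := pair_positions grid
  pos.items.foldl (fun total vc =>
    match vc.2 with
    | a :: b :: _ =>
        let dist := pv_manhattan a b
        if dist > 1 then total + (dist - 1) else total
    | _ => total) 0

-- ===== PORT B =====
-- helper of B: the outer while-loop of Source B; the inner 'advance j over the run'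
-- scan is the takeWhile/dropWhile split, the run's first two cells are scored
def pvScan : List (Int × (Int × Int)) → Int
  | [] => 0
  | (v, p1) :: rest =>
      let run := rest.takeWhile (fun q => q.1 == v)
      let contrib :=
        match run with
        | [] => 0
        | (_, p2) :: _ => max 0 (|p1.1 - p2.1| + |p1.2 - p2.2| - 1)
      contrib + pvScan (rest.dropWhile (fun q => q.1 == v))
termination_by l => l.length
decreasing_by
  simp
  exact (List.length_dropWhile_le _ _).trans (by simp)

def heuristic_value_alt (grid : List (List Int)) : Int :=
  let cells := (PySem.List.enumerate grid).flatMap (fun rrow =>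
    (PySem.List.enumerate rrow.2).map (fun cv => (cv.2, (rrow.1, cv.1))))
  pvScan (PySem.List.sorted cells (fun t => t.1))

-- ===== PRECONDITION & SPEC =====
def Spec_heuristic_value (grid : List (List Int)) (out : Int) : Prop := out = heuristic_value_alt grid
instance (grid : List (List Int)) (out : Int) : Decidable (Spec_heuristic_value grid out) := by unfold Spec_heuristic_value; infer_instance

-- ===== CLAIM (what is proved, stated in full; the proofs are below) =====
def Claim_equal_heuristic_value : Prop := ∀ (grid : List (List Int)), Dom_heuristic_value grid → Spec_heuristic_value grid (heuristic_value grid)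

-- ===== LEMMAS AND PROOFS =====

-- the grid's cells as (value, coord) pairs, in traversal order
def pvCells (grid : List (List Int)) : List (Int × (Int × Int)) :=
  (PySem.List.enumerate grid).flatMap (fun rrow =>
    (PySem.List.enumerate rrow.2).map (fun cv => (cv.2, (rrow.1, cv.1))))

-- the coordinates of value v among cells l, in order
def pvOcc (v : Int) (l : List (Int × (Int × Int))) : List (Int × Int) :=
  (l.filter (fun p => p.1 == v)).map (·.2)

-- contribution of one value's coordinate list
def pvF (coords : List (Int × Int)) : Int :=
  match coords with
  | a :: b :: _ => let dist := pv_manhattan a b; if dist > 1 then dist - 1 else 0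
  | _ => 0

theorem foldl_flatMap {α β σ : Type} (l : List α) (f : α → List β) (g : σ → β → σ) (init : σ) :
    (l.flatMap f).foldl g init = l.foldl (fun st x => (f x).foldl g st) init := by
  induction l generalizing init with
  | nil => rfl
  | cons x xs ih => simp [List.flatMap_cons, List.foldl_append, ih]

theorem pair_positions_eq (grid : List (List Int)) :
    pair_positions grid = (pvCells grid).foldl
      (fun d p => d.modify p.1 [] (· ++ [p.2])) PySem.Dict.empty := by
  unfold pair_positions pvCells
  rw [foldl_flatMap]
  apply PySem.List.foldl_congr_mem
  intro d rrow _
  rw [List.foldl_map]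

-- A's per-item step adds pvF of the coordinate list
theorem astep_sum (items : List (Int × List (Int × Int))) (t0 : Int) :
    items.foldl (fun total vc =>
      match vc.2 with
      | a :: b :: _ =>
          let dist := pv_manhattan a b
          if dist > 1 then total + (dist - 1) else total
      | _ => total) t0 = t0 + (items.map (fun vc => pvF vc.2)).sum := by
  induction items generalizing t0 with
  | nil => simp
  | cons vc rest ih =>
    rw [List.foldl_cons, List.map_cons, List.sum_cons, ih]
    rcases vc with ⟨v, (_ | ⟨a, (_ | ⟨b, r⟩)⟩)⟩
    · simp [pvF]
    · simp [pvF]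
    · simp only [pvF]
      split <;> ring

-- A equals the sum of pvF over the distinct values of the cell list
theorem a_eq_sum (grid : List (List Int)) :
    heuristic_value grid =
      ((PySem.Set.ofList ((pvCells grid).map (·.1))).map
        (fun v => pvF (pvOcc v (pvCells grid)))).sum := by
  show ((pair_positions grid).items.foldl _ 0) = _
  have hnd : (pair_positions grid).keys.Nodup := by
    rw [pair_positions_eq]
    exact PySem.Dict.nodup_keys_foldl_modify_key _ _ _ _ _ PySem.Dict.nodup_keys_empty
  rw [astep_sum, PySem.Dict.items_eq_map_keys _ hnd []]
  have hkeys : (pair_positions grid).keys = PySem.Set.ofList ((pvCells grid).map (·.1)) := by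
    rw [pair_positions_eq, PySem.Dict.keys_foldl_modify_key]
    simp [PySem.Dict.keys_empty, PySem.Set.update_nil_left]
  have hgetD : ∀ k, (pair_positions grid).getD k [] = pvOcc k (pvCells grid) := by
    intro k
    rw [pair_positions_eq, PySem.Dict.getD_foldl_modify_append, PySem.Dict.getD_empty]
    rfl
  rw [hkeys, List.map_map]
  rw [List.map_congr_left (fun k _ => by
    show pvF ((pair_positions grid).getD k []) = pvF (pvOcc k (pvCells grid))
    rw [hgetD k])]
  ring

-- STABILITY: filtering one key class commutes with the insertion sort
theorem filter_insertBy_of_ne {A : Type} (before : A → A → Bool) (p : A → Bool)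
    (x : A) (ys : List A) (hx : p x = false) :
    (PySem.List.insertBy before x ys).filter p = ys.filter p := by
  induction ys with
  | nil => simp [PySem.List.insertBy, hx]
  | cons y ys ih =>
    show (if before x y then x :: y :: ys else y :: PySem.List.insertBy before x ys).filter p = _
    split_ifs with h
    · simp [List.filter_cons, hx]
    · rw [List.filter_cons, List.filter_cons, ih]

theorem filter_insertBy_self {A : Type} (key : A → Int) (x : A) (ys : List A)
    (hp : ys.Pairwise (fun a b => key a ≤ key b)) :
    (PySem.List.insertBy (fun a b => decide (key a < key b)) x ys).filter
        (fun q => key q == key x) =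
      ys.filter (fun q => key q == key x) ++ [x] := by
  induction ys with
  | nil => simp [PySem.List.insertBy]
  | cons y ys ih =>
    rcases List.pairwise_cons.mp hp with ⟨hy, hys⟩
    show (if decide (key x < key y) then x :: y :: ys
          else y :: PySem.List.insertBy _ x ys).filter _ = _
    split_ifs with h
    · have h' : key x < key y := of_decide_eq_true h
      have hnil : (y :: ys).filter (fun q => key q == key x) = [] := by
        rw [List.filter_eq_nil_iff]
        intro z hz
        simp only [beq_iff_eq]
        rcases List.mem_cons.mp hz with rfl | hz'
        · omega
        · have := hy z hz'
          omega
      rw [List.filter_cons_of_pos (by simp), hnil]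
      simp
    · rw [List.filter_cons, List.filter_cons, ih hys]
      split_ifs with h2 <;> simp

theorem filter_sorted_eq {A : Type} (key : A → Int) (xs : List A) (v : Int) :
    (PySem.List.sorted xs key).filter (fun q => key q == v) =
      xs.filter (fun q => key q == v) := by
  induction xs using List.reverseRecOn with
  | nil => simp [PySem.List.sorted_eq_foldl_insertBy]
  | append_singleton l x ih =>
    have hsorted : PySem.List.sorted (l ++ [x]) key =
        PySem.List.insertBy (fun a b => decide (key a < key b)) x
          (PySem.List.sorted l key) := by
      rw [PySem.List.sorted_eq_foldl_insertBy, List.foldl_append,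
        ← PySem.List.sorted_eq_foldl_insertBy]
      rfl
    rw [hsorted, List.filter_append]
    by_cases hx : key x = v
    · subst hx
      rw [filter_insertBy_self key x _ (PySem.List.sorted_pairwise l key), ih]
      simp
    · have hx' : (key x == v) = false := by simpa using hx
      rw [filter_insertBy_of_ne _ (fun q => key q == v) x _ hx', ih]
      simp [hx']

-- in a key-sorted tail whose keys all dominate v, the v-run is an initial segment
theorem filter_eq_takeWhile_of_sorted (v : Int) (l : List (Int × (Int × Int)))
    (hp : l.Pairwise (fun a b => a.1 ≤ b.1)) (hge : ∀ q ∈ l, v ≤ q.1) :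
    l.filter (fun q => q.1 == v) = l.takeWhile (fun q => q.1 == v) ∧
    ∀ q ∈ l.dropWhile (fun q => q.1 == v), q.1 ≠ v := by
  induction l with
  | nil => exact ⟨rfl, by simp⟩
  | cons y t ih =>
    rcases List.pairwise_cons.mp hp with ⟨hy, ht⟩
    by_cases h : y.1 = v
    · have hb : (y.1 == v) = true := by simpa using h
      have hge' : ∀ q ∈ t, v ≤ q.1 := fun q hq => le_trans (le_of_eq h.symm) (hy q hq)
      obtain ⟨ih1, ih2⟩ := ih ht hge'
      refine ⟨?_, ?_⟩
      · rw [List.filter_cons, List.takeWhile_cons, hb, ih1]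
        simp
      · rw [List.dropWhile_cons, hb]
        simpa using ih2
    · have hb : (y.1 == v) = false := by simpa using h
      have hgt : v < y.1 := lt_of_le_of_ne (hge y List.mem_cons_self) (fun hh => h hh.symm)
      have hnone : ∀ q ∈ y :: t, q.1 ≠ v := by
        intro q hq
        rcases List.mem_cons.mp hq with rfl | hq'
        · exact h
        · have := hy q hq'
          omega
      refine ⟨?_, ?_⟩
      · have hfilnil : (y :: t).filter (fun q => q.1 == v) = [] := by
          rw [List.filter_eq_nil_iff]
          intro q hq
          simpa using hnone q hq
        rw [hfilnil, List.takeWhile_cons, hb]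
        simp
      · rw [List.dropWhile_cons, hb]
        simpa using hnone

-- B's run scan computes the sum over distinct values, on any key-sorted list
theorem pvScan_eq_sum (s : List (Int × (Int × Int)))
    (hp : s.Pairwise (fun a b => a.1 ≤ b.1)) :
    pvScan s = ((PySem.Set.ofList (s.map (·.1))).map (fun v => pvF (pvOcc v s))).sum := by
  induction hn : s.length using Nat.strong_induction_on generalizing s with
  | _ n ih =>
  match s, hp, hn with
  | [], _, _ => simp [pvScan, PySem.Set.ofList_nil]
  | (v, p1) :: rest, hp, hn =>
    rcases List.pairwise_cons.mp hp with ⟨hv, hrest⟩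
    obtain ⟨hfil, hnov⟩ := filter_eq_takeWhile_of_sorted v rest hrest hv
    have hsplit : rest.takeWhile (fun q => q.1 == v) ++ rest.dropWhile (fun q => q.1 == v) = rest :=
      List.takeWhile_append_dropWhile
    have hp' : (rest.dropWhile (fun q => q.1 == v)).Pairwise (fun a b => a.1 ≤ b.1) :=
      List.Pairwise.sublist (List.dropWhile_sublist _) hrest
    have hlen : (rest.dropWhile (fun q => q.1 == v)).length < n := by
      rw [← hn]
      exact Nat.lt_succ_of_le (List.length_dropWhile_le _ _)
    have ihr := ih _ hlen (rest.dropWhile (fun q => q.1 == v)) hp' rfl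
    have hrunv : ∀ q ∈ rest.takeWhile (fun q => q.1 == v), q.1 = v := by
      intro q hq
      simpa using List.mem_takeWhile_imp hq
    have hocc : pvOcc v ((v, p1) :: rest) =
        p1 :: (rest.takeWhile (fun q => q.1 == v)).map (·.2) := by
      unfold pvOcc
      rw [List.filter_cons]
      simp only [show (((v, p1) : Int × (Int × Int)).1 == v) = true from by simp, if_true,
        List.map_cons]
      rw [hfil]
    have hcontrib :
        (match rest.takeWhile (fun q => q.1 == v) with
         | [] => (0 : Int)
         | (_, p2) :: _ => max 0 (|p1.1 - p2.1| + |p1.2 - p2.2| - 1)) =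
        pvF (pvOcc v ((v, p1) :: rest)) := by
      rw [hocc]
      cases hr : rest.takeWhile (fun q => q.1 == v) with
      | nil => simp [pvF]
      | cons q qs =>
        rcases q with ⟨w, p2⟩
        simp only [List.map_cons, pvF, pv_manhattan]
        have h0 : (0 : Int) ≤ |p1.1 - p2.1| := abs_nonneg _
        have h1 : (0 : Int) ≤ |p1.2 - p2.2| := abs_nonneg _
        generalize |p1.1 - p2.1| = x at *
        generalize |p1.2 - p2.2| = y at *
        split_ifs with h
        · exact max_eq_right (by omega)
        · exact max_eq_left (by omega)
    have hocc_w : ∀ w, w ≠ v →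
        pvOcc w ((v, p1) :: rest) = pvOcc w (rest.dropWhile (fun q => q.1 == v)) := by
      intro w hw
      unfold pvOcc
      have hb : ((v : Int) == w) = false := by
        simp only [beq_eq_false_iff_ne]
        exact fun h => hw h.symm
      have hrunnil : (rest.takeWhile (fun q => q.1 == v)).filter (fun p => p.1 == w) = [] := by
        rw [List.filter_eq_nil_iff]
        intro q hq
        rw [hrunv q hq]
        simp [hb]
      have hfr : rest.filter (fun p => p.1 == w) =
          (rest.dropWhile (fun q => q.1 == v)).filter (fun p => p.1 == w) := by
        conv_lhs => rw [← hsplit]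
        rw [List.filter_append, hrunnil, List.nil_append]
      rw [List.filter_cons]
      simp only [hb, Bool.false_eq_true, if_false]
      rw [hfr]
    have hv_not : v ∉ (rest.dropWhile (fun q => q.1 == v)).map (·.1) := by
      intro hvm
      rcases List.mem_map.mp hvm with ⟨q, hq, hqv⟩
      exact hnov q hq hqv
    have hperm : (PySem.Set.ofList (((v, p1) :: rest).map (·.1))).Perm
        (v :: PySem.Set.ofList ((rest.dropWhile (fun q => q.1 == v)).map (·.1))) := by
      rw [List.perm_ext_iff_of_nodup (PySem.Set.nodup_ofList _)
        (List.nodup_cons.mpr ⟨fun h => hv_not ((PySem.Set.mem_ofList _ _).mp h),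
          PySem.Set.nodup_ofList _⟩)]
      intro a
      rw [PySem.Set.mem_ofList, List.mem_cons, PySem.Set.mem_ofList]
      constructor
      · intro h
        rcases List.mem_map.mp h with ⟨q, hq, rfl⟩
        rcases List.mem_cons.mp hq with rfl | hq'
        · exact Or.inl rfl
        · rw [← hsplit] at hq'
          rcases List.mem_append.mp hq' with hqrun | hqr
          · exact Or.inl (hrunv q hqrun)
          · exact Or.inr (List.mem_map.mpr ⟨q, hqr, rfl⟩)
      · intro h
        rcases h with rfl | h
        · exact List.mem_map.mpr ⟨(a, p1), List.mem_cons_self, rfl⟩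
        · rcases List.mem_map.mp h with ⟨q, hq, rfl⟩
          have hqrest : q ∈ rest := by
            rw [← hsplit]
            exact List.mem_append.mpr (Or.inr hq)
          exact List.mem_map.mpr ⟨q, List.mem_cons_of_mem _ hqrest, rfl⟩
    have hstep : pvScan ((v, p1) :: rest) =
        (match rest.takeWhile (fun q => q.1 == v) with
         | [] => (0 : Int)
         | (_, p2) :: _ => max 0 (|p1.1 - p2.1| + |p1.2 - p2.2| - 1)) +
        pvScan (rest.dropWhile (fun q => q.1 == v)) := by
      rw [pvScan]
    have hsum := (hperm.map (fun w => pvF (pvOcc w ((v, p1) :: rest)))).sum_eq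
    rw [hstep, ihr, hsum, List.map_cons, List.sum_cons, hcontrib]
    congr 1
    apply congrArg List.sum
    apply List.map_congr_left
    intro w hw
    have hwv : w ≠ v := by
      intro h
      subst h
      exact hv_not ((PySem.Set.mem_ofList _ _).mp hw)
    rw [← hocc_w w hwv]

-- stability specialised to pvOcc
theorem pvOcc_sorted (v : Int) (l : List (Int × (Int × Int))) :
    pvOcc v (PySem.List.sorted l (fun t => t.1)) = pvOcc v l := by
  unfold pvOcc
  exact congrArg (List.map (fun x => x.2)) (filter_sorted_eq (fun t : Int × (Int × Int) => t.1) l v)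

-- ===== VERDICT (by name: the statement is the Claim_ definition above) =====
theorem heuristic_value_spec : Claim_equal_heuristic_value := by
  intro grid _
  unfold Spec_heuristic_value
  rw [a_eq_sum]
  show _ = pvScan (PySem.List.sorted (pvCells grid) (fun t => t.1))
  rw [pvScan_eq_sum _ (PySem.List.sorted_pairwise _ _)]
  have hperm : (PySem.Set.ofList ((pvCells grid).map (·.1))).Perm
      (PySem.Set.ofList ((PySem.List.sorted (pvCells grid) (fun t => t.1)).map (·.1))) := by
    rw [List.perm_ext_iff_of_nodup (PySem.Set.nodup_ofList _) (PySem.Set.nodup_ofList _)]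
    intro a
    rw [PySem.Set.mem_ofList, PySem.Set.mem_ofList]
    constructor
    · intro h
      rcases List.mem_map.mp h with ⟨q, hq, rfl⟩
      exact List.mem_map.mpr ⟨q, (PySem.List.mem_sorted _ _ _ _).mpr hq, rfl⟩
    · intro h
      rcases List.mem_map.mp h with ⟨q, hq, rfl⟩
      exact List.mem_map.mpr ⟨q, (PySem.List.mem_sorted _ _ _ _).mp hq, rfl⟩
  rw [(hperm.map (fun v => pvF (pvOcc v (pvCells grid)))).sum_eq]
  apply congrArg List.sum
  apply List.map_congr_left
  intro w hw
  rw [pvOcc_sorted w (pvCells grid)]
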